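-- pv_equiv track=rewrite | github.com/taras-svystun/Contest3 | Python_code/B.py | max_power_prefix
-- ===== SOURCE A (Python) =====
-- def max_power_prefix(string: str) -> int:
--     length = len(string)
--     i = 1
--     while i < length // 2:
--         prefix = string[:i]
--         start, finish = i, 2 * i
--         while finish < length and prefix == string[start:finish]:
--             start += i
--             finish += i
--
--         if finish == length and string[start:finish] == prefix:
--             return length // i
--         i += 1
--     return 1
-- ===== SOURCE B (Python) =====
-- def max_power_prefix(string: str) -> int:
--     # Only divisor candidates can succeed; one replicate-compare replaces A's block-scan loop.
--     n = len(string)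
--     for i in range(1, n // 2):
--         if n % i == 0 and string[:i] * (n // i) == string:
--             return n // i
--     return 1
-- ===== Notes on version B (the rewrite author's own statement) =====
-- stated objective: faster
-- what changed: A's inner while loop that compares the candidate prefix block by block is replaced by an O(1) divisibility test plus a single replicate-and-compare (string[:i] * (n//i) == string), so non-divisor candidates are skipped in O(1).
import Mathlib
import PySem

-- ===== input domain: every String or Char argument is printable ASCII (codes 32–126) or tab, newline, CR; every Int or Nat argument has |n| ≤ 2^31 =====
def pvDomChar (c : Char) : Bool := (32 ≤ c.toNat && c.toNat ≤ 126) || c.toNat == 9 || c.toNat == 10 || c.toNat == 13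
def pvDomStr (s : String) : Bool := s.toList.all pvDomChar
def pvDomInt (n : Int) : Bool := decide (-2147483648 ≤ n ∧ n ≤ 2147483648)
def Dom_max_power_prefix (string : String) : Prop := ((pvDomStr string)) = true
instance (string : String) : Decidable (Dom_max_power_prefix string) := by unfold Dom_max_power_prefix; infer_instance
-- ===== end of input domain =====

-- B replaces A's per-candidate block-scanning inner loop by a divisibility test plus one
-- replicate-and-compare, skipping all non-divisor candidates (objective: faster).

-- ===== PORT A =====
-- All Python ints here are ≥ 0, so loop counters are Nat (Nat division by 2 / by i ≥ 1
-- coincides with Python's //); string slices are PySem.List.slice on the code points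
-- (exact Python semantics, Chars.slice_eq_listSlice / Chars.len_eq). The inner 'while'
-- carries (start, finish); the argument 0 < i (true at every call site: i starts at 1
-- and only grows) justifies termination, it changes no value.
def mppInner (s p : List Char) (i : Nat) (_hi : 0 < i) (start finish : Nat) : Nat × Nat :=
  if h : finish < s.length ∧ p = PySem.List.slice s (some (start : Int)) (some (finish : Int)) then
    mppInner s p i _hi (start + i) (finish + i)
  else (start, finish)
termination_by s.length - finish
decreasing_by obtain ⟨h1, -⟩ := h; omega

def mppOuter (s : List Char) (length i : Nat) (hi : 0 < i) : Int :=
  if _h : i < length / 2 then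
    let pre := PySem.List.slice s none (some (i : Int))
    let sf := mppInner s pre i hi i (2 * i)
    if sf.2 = length ∧ PySem.List.slice s (some (sf.1 : Int)) (some (sf.2 : Int)) = pre then
      ((length / i : Nat) : Int)
    else mppOuter s length (i + 1) (by omega)
  else 1
termination_by length / 2 - i

def max_power_prefix (string : String) : Int :=
  mppOuter string.toList string.toList.length 1 one_pos

-- ===== PORT B =====
-- Source B: for i in range(1, n // 2): if n % i == 0 and string[:i] * (n // i) == string: return n // i
-- ('str * int' is PySem.List.pyRepeat on the code points).
def mppAltLoop (s : List Char) (n i : Nat) (_hi : 0 < i) : Int :=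
  if _h : i < n / 2 then
    if n % i = 0 ∧ PySem.List.pyRepeat (PySem.List.slice s none (some (i : Int))) ((n / i : Nat) : Int) = s then
      ((n / i : Nat) : Int)
    else mppAltLoop s n (i + 1) (by omega)
  else 1
termination_by n / 2 - i

def max_power_prefix_alt (string : String) : Int :=
  mppAltLoop string.toList string.toList.length 1 one_pos

-- ===== PRECONDITION & SPEC =====
def Spec_max_power_prefix (string : String) (out : Int) : Prop := out = max_power_prefix_alt string
instance (string : String) (out : Int) : Decidable (Spec_max_power_prefix string out) := by unfold Spec_max_power_prefix; infer_instance

-- ===== CLAIM (what is proved, stated in full; the proofs are below) =====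
def Claim_equal_max_power_prefix : Prop := ∀ (string : String), Dom_max_power_prefix string → Spec_max_power_prefix string (max_power_prefix string)

-- ===== LEMMAS AND PROOFS =====

-- success of A's inner loop followed by its final check, the slice in drop/take form
def mppSucc (s p : List Char) (i : Nat) (hi : 0 < i) (start finish : Nat) : Prop :=
  (mppInner s p i hi start finish).2 = s.length ∧
  (s.drop (mppInner s p i hi start finish).1).take
    ((mppInner s p i hi start finish).2 - (mppInner s p i hi start finish).1) = p

lemma mppInner_step (s p : List Char) (i : Nat) (hi : 0 < i) (start finish : Nat)
    (h : finish < s.length ∧ p = PySem.List.slice s (some (start : Int)) (some (finish : Int))) :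
    mppInner s p i hi start finish = mppInner s p i hi (start + i) (finish + i) := by
  conv_lhs => rw [mppInner]
  exact dif_pos h

lemma mppInner_stop (s p : List Char) (i : Nat) (hi : 0 < i) (start finish : Nat)
    (h : ¬(finish < s.length ∧ p = PySem.List.slice s (some (start : Int)) (some (finish : Int)))) :
    mppInner s p i hi start finish = (start, finish) := by
  conv_lhs => rw [mppInner]
  exact dif_neg h

-- characterization of A's candidate test: starting at block m it succeeds iff i divides
-- the length with quotient K > m and every block from m on equals p
lemma mppSucc_iff (s p : List Char) (i : Nat) (hi : 0 < i) :
    ∀ m, mppSucc s p i hi (m * i) ((m + 1) * i) ↔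
      ∃ K, s.length = K * i ∧ m < K ∧ ∀ j, m ≤ j → j < K → (s.drop (j * i)).take i = p := by
  suffices H : ∀ n m, s.length - m * i = n →
      (mppSucc s p i hi (m * i) ((m + 1) * i) ↔
        ∃ K, s.length = K * i ∧ m < K ∧ ∀ j, m ≤ j → j < K → (s.drop (j * i)).take i = p) by
    intro m; exact H _ m rfl
  intro n
  induction n using Nat.strong_induction_on with
  | _ n IH =>
  intro m hn
  have hsub : (m + 1) * i - m * i = i := by rw [Nat.succ_mul]; omega
  have hblk : PySem.List.slice s (some ((m * i : Nat) : Int)) (some (((m + 1) * i : Nat) : Int))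
      = (s.drop (m * i)).take i := by
    rw [PySem.List.slice_natCast, hsub]
  by_cases hc : (m + 1) * i < s.length ∧ p = PySem.List.slice s (some ((m * i : Nat) : Int)) (some (((m + 1) * i : Nat) : Int))
  · -- the loop runs one more step
    have e1 : m * i + i = (m + 1) * i := (Nat.succ_mul m i).symm
    have e2 : (m + 1) * i + i = (m + 1 + 1) * i := by ring
    have hstep : mppSucc s p i hi (m * i) ((m + 1) * i) ↔ mppSucc s p i hi ((m + 1) * i) ((m + 1 + 1) * i) := by
      unfold mppSucc
      rw [mppInner_step s p i hi _ _ hc, e1, e2]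
    have hmlt : m * i < s.length := by
      have := hc.1; rw [Nat.succ_mul] at this; omega
    have hdec : s.length - (m + 1) * i < n := by
      rw [Nat.succ_mul]; omega
    rw [hstep, IH _ hdec (m + 1) rfl]
    have hbm : (s.drop (m * i)).take i = p := by rw [← hblk]; exact hc.2.symm
    constructor
    · rintro ⟨K, hK, hmK, hall⟩
      refine ⟨K, hK, by omega, fun j hj1 hj2 => ?_⟩
      rcases Nat.eq_or_lt_of_le hj1 with rfl | hj
      · exact hbm
      · exact hall j hj hj2
    · rintro ⟨K, hK, hmK, hall⟩
      have hKne : K ≠ m + 1 := by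
        rintro rfl; exact absurd hK (by omega)
      exact ⟨K, hK, by omega, fun j hj1 hj2 => hall j (by omega) hj2⟩
  · -- the loop stops here; only the final check remains
    unfold mppSucc
    rw [mppInner_stop s p i hi _ _ hc]
    simp only [hsub]
    constructor
    · rintro ⟨h1, h2⟩
      exact ⟨m + 1, h1.symm, by omega, fun j hj1 hj2 => by
        have : j = m := by omega
        subst this; exact h2⟩
    · rintro ⟨K, hK, hmK, hall⟩
      have hbm : (s.drop (m * i)).take i = p := hall m le_rfl hmK
      have hnot : ¬ (m + 1) * i < s.length := by
        intro hlt
        exact hc ⟨hlt, by rw [hblk]; exact hbm.symm⟩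
      have hle : (m + 1) * i ≤ K * i := Nat.mul_le_mul_right i (by omega)
      exact ⟨by omega, hbm⟩

-- "every i-block equals p" is "the list is p repeated K times"
lemma blocks_iff_repeat (p : List Char) (i : Nat) (hp : p.length = i) :
    ∀ (K : Nat) (s : List Char), s.length = K * i →
      ((∀ j, j < K → (s.drop (j * i)).take i = p) ↔ s = (List.replicate K p).flatten) := by
  intro K
  induction K with
  | zero =>
    intro s hs
    have : s = [] := List.eq_nil_of_length_eq_zero (by simpa using hs)
    subst this; simp
  | succ K IH =>
    intro s hs
    have hlen : i ≤ s.length := by rw [hs, Nat.succ_mul]; omega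
    have ht : (s.drop i).length = K * i := by
      rw [List.length_drop, hs, Nat.succ_mul]; omega
    have hshift : ∀ j : Nat, ((s.drop i).drop (j * i)).take i = (s.drop ((j + 1) * i)).take i := by
      intro j
      rw [List.drop_drop, Nat.succ_mul, Nat.add_comm]
    constructor
    · intro h
      have h0 : s.take i = p := by simpa using h 0 (by omega)
      have hb : s.drop i = (List.replicate K p).flatten := by
        rw [← IH (s.drop i) ht]
        intro j hj
        rw [hshift]
        exact h (j + 1) (by omega)
      rw [List.replicate_succ, List.flatten_cons, ← hb]
      conv_lhs => rw [← List.take_append_drop i s]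
      rw [h0]
    · intro h
      have hsplit : s = p ++ (List.replicate K p).flatten := by
        rw [h, List.replicate_succ, List.flatten_cons]
      intro j hj
      cases j with
      | zero =>
        simp only [Nat.zero_mul, List.drop_zero]
        rw [hsplit, ← hp, List.take_left]
      | succ j =>
        rw [← hshift j]
        have hdrop : s.drop i = (List.replicate K p).flatten := by
          rw [hsplit, ← hp, List.drop_left]
        rw [hdrop]
        exact (IH ((List.replicate K p).flatten) (by rw [← hdrop, ht])).mpr rfl j (by omega)

-- A's candidate test at i equals B's divisibility + replicate test
lemma cond_iff (s : List Char) (i : Nat) (hi : 0 < i) (h2 : 2 * i < s.length) :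
    mppSucc s (s.take i) i hi i (2 * i) ↔
      s.length % i = 0 ∧
        PySem.List.pyRepeat (s.take i) ((s.length / i : Nat) : Int) = s := by
  have hp : (s.take i).length = i := by
    rw [List.length_take]; omega
  have hrep : ∀ K : Nat, PySem.List.pyRepeat (s.take i) ((K : Nat) : Int) = (List.replicate K (s.take i)).flatten := by
    intro K; simp [PySem.List.pyRepeat]
  have hm : mppSucc s (s.take i) i hi i (2 * i) ↔ mppSucc s (s.take i) i hi (1 * i) ((1 + 1) * i) := by
    rw [Nat.one_mul, show (1 + 1) * i = 2 * i from by ring]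
  rw [hm, mppSucc_iff s (s.take i) i hi 1]
  constructor
  · rintro ⟨K, hK, h1K, hall⟩
    have hdvd : i ∣ s.length := ⟨K, by rw [hK, Nat.mul_comm]⟩
    have hKdiv : s.length / i = K := by rw [hK, Nat.mul_div_cancel K hi]
    have hallK : ∀ j, j < K → (s.drop (j * i)).take i = s.take i := by
      intro j hj
      cases j with
      | zero => simp
      | succ j => exact hall (j + 1) (by omega) hj
    refine ⟨(Nat.dvd_iff_mod_eq_zero).mp hdvd, ?_⟩
    rw [hKdiv, hrep K]
    exact ((blocks_iff_repeat (s.take i) i hp K s hK).mp hallK).symm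
  · rintro ⟨hmod, hrepeq⟩
    have hdvd : i ∣ s.length := (Nat.dvd_iff_mod_eq_zero).mpr hmod
    set K := s.length / i with hKdef
    have hK : s.length = K * i := by
      rw [hKdef, Nat.div_mul_cancel hdvd]
    have h2K : 2 < K := by
      have : 2 * i < K * i := by omega
      exact Nat.lt_of_mul_lt_mul_right this
    have hallK := (blocks_iff_repeat (s.take i) i hp K s hK).mpr
      (by rw [← hrep K, hrepeq])
    exact ⟨K, hK, by omega, fun j hj1 hj2 => hallK j hj2⟩

-- the two searches agree from any start index i ≥ 1
lemma outer_eq_alt (s : List Char) :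
    ∀ i (hi : 0 < i), mppOuter s s.length i hi = mppAltLoop s s.length i hi := by
  suffices H : ∀ n i (hi : 0 < i), s.length / 2 - i = n →
      mppOuter s s.length i hi = mppAltLoop s s.length i hi by
    intro i hi; exact H _ i hi rfl
  intro n
  induction n using Nat.strong_induction_on with
  | _ n IH =>
  intro i hi hn
  rw [mppOuter, mppAltLoop]
  by_cases h : i < s.length / 2
  · rw [dif_pos h, dif_pos h]
    have h2 : 2 * i < s.length := by omega
    simp only [PySem.List.slice_to_natCast, PySem.List.slice_natCast]
    have hc := cond_iff s i hi h2
    by_cases hA : mppSucc s (s.take i) i hi i (2 * i)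
    · have hB := hc.mp hA
      obtain ⟨hA1, hA2⟩ := hA
      rw [if_pos ⟨hA1, hA2⟩, if_pos hB]
    · have hB := hc.not.mp hA
      unfold mppSucc at hA
      rw [if_neg hA, if_neg hB]
      exact IH (s.length / 2 - (i + 1)) (by omega) (i + 1) (by omega) rfl
  · rw [dif_neg h, dif_neg h]

-- ===== VERDICT (by name: the statement is the Claim_ definition above) =====
theorem max_power_prefix_spec : Claim_equal_max_power_prefix := by
  intro string _
  unfold Spec_max_power_prefix max_power_prefix max_power_prefix_alt
  exact outer_eq_alt string.toList 1 one_pos
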